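-- pv_equiv track=rewrite | github.com/camiloaacevedo/counting-techniques | EnumeracionConteo.py | nPr
-- ===== SOURCE A (Python) =====
-- def nPr(A, r, actual=[]):
--     resultados = []
--
--     if len(actual) == r:
--         return [actual]
--
--     if not A:
--         return []
--
--     for i in range(len(A)):
--         elemento = A[i]
--         restantes = A[:i] + A[i+1:]
--         nueva = actual + [elemento]
--         resultados.extend(nPr(restantes, r, nueva))
--
--     return resultados
-- ===== SOURCE B (Python) =====
-- def nPr(A, r, actual=[]):
--     need = r - len(actual)
--     if need < 0 or need > len(A):
--         return []
--     level = [(actual, A)]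
--     for _ in range(need):
--         level = [(pre + [rem[i]], rem[:i] + rem[i+1:])
--                  for (pre, rem) in level for i in range(len(rem))]
--     return [pre for (pre, _) in level]
-- ===== Notes on version B (the rewrite author's own statement) =====
-- stated objective: alternative
-- what changed: Replaces A's depth-first recursion (pick an index, remove it, recurse) with an iterative breadth-first frontier of (prefix, remaining) pairs expanded need = r - len(actual) times by one comprehension.
import Mathlib
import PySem

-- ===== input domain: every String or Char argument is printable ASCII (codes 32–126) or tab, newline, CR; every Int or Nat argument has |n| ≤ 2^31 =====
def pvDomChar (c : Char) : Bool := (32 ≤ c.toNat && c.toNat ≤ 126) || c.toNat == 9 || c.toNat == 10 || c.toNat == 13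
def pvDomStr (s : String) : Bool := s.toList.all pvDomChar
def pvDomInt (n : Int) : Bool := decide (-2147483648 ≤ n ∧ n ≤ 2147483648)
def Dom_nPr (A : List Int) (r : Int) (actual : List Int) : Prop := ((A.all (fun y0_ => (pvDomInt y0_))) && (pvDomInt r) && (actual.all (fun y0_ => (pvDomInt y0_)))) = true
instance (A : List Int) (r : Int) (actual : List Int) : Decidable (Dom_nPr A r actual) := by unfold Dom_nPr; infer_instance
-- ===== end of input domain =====

-- B replaces A's depth-first recursion by an iterative breadth-first frontier of
-- (prefix, remaining) pairs expanded (r - len(actual)) times; same outputs, same order.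

-- ===== PORT A =====
-- A[i], A[:i], A[i+1:] are read with getD/take/drop: i comes from range(len(A)), so it is
-- a nonnegative in-range index and these are exact for Python's indexing/slicing.
def nPr (A : List Int) (r : Int) (actual : List Int) : List (List Int) :=
  if (actual.length : Int) = r then [actual]
  else if A = [] then []
  else
    (List.range A.length).attach.foldl
      (fun resultados i =>
        let elemento := A.getD i.1 0
        let restantes := A.take i.1 ++ A.drop (i.1 + 1)
        let nueva := actual ++ [elemento]
        resultados ++ nPr restantes r nueva)
      []
termination_by A.length
decreasing_by
  have hi : i.1 < A.length := List.mem_range.mp i.2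
  simp only [List.length_append, List.length_take, List.length_drop]
  omega

-- ===== PORT B =====
-- one expansion step: the inner 'for i in range(len(rem))' of B's comprehension
def pyStep (s : List Int × List Int) : List (List Int × List Int) :=
  (List.range s.2.length).map
    (fun i => (s.1 ++ [s.2.getD i 0], s.2.take i ++ s.2.drop (i + 1)))

def nPr_alt (A : List Int) (r : Int) (actual : List Int) : List (List Int) :=
  let need := r - (actual.length : Int)
  if need < 0 ∨ need > (A.length : Int) then []
  else
    ((List.range need.toNat).foldl (fun level _ => level.flatMap pyStep) [(actual, A)]).map
      Prod.fst

-- ===== PRECONDITION & SPEC =====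
def Spec_nPr (A : List Int) (r : Int) (actual : List Int) (out : List (List Int)) : Prop := out = nPr_alt A r actual
instance (A : List Int) (r : Int) (actual : List Int) (out : List (List Int)) : Decidable (Spec_nPr A r actual out) := by unfold Spec_nPr; infer_instance

-- ===== CLAIM (what is proved, stated in full; the proofs are below) =====
def Claim_equal_nPr : Prop := ∀ (A : List Int) (r : Int) (actual : List Int), Dom_nPr A r actual → Spec_nPr A r actual (nPr A r actual)

-- ===== LEMMAS AND PROOFS =====

-- n-fold expansion of a frontier, the shape of B's 'for _ in range(need)' loop
def expandN : Nat → List (List Int × List Int) → List (List Int × List Int)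
  | 0, l => l
  | n + 1, l => expandN n (l.flatMap pyStep)

theorem foldl_const_expand (idx : List Nat) (l : List (List Int × List Int)) :
    idx.foldl (fun level _ => level.flatMap pyStep) l = expandN idx.length l := by
  induction idx generalizing l with
  | nil => rfl
  | cons a t ih => simp [List.foldl_cons, expandN, ih]

theorem expandN_append (n : Nat) (l₁ l₂ : List (List Int × List Int)) :
    expandN n (l₁ ++ l₂) = expandN n l₁ ++ expandN n l₂ := by
  induction n generalizing l₁ l₂ with
  | zero => rfl
  | succ n ih => simp [expandN, List.flatMap_append, ih]

theorem expandN_nil (n : Nat) : expandN n [] = [] := by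
  induction n with
  | zero => rfl
  | succ n ih => simp [expandN, ih]

theorem expandN_flat (n : Nat) (l : List (List Int × List Int)) :
    expandN n l = l.flatMap (fun x => expandN n [x]) := by
  induction l with
  | nil => simp [expandN_nil]
  | cons a t ih =>
      have : a :: t = [a] ++ t := rfl
      rw [this, expandN_append, ih]; simp

theorem attach_flatMap {α β : Type} (l : List α) (F : α → List β) :
    l.attach.flatMap (fun x => F x.1) = l.flatMap F := by
  induction l with
  | nil => rfl
  | cons a t ih => simp [List.attach_cons, List.flatMap_map, ih]

-- A returns [] whenever the accumulator is already longer than r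
theorem nPr_neg : ∀ (n : Nat) (A : List Int) (r : Int) (actual : List Int),
    A.length = n → r < (actual.length : Int) → nPr A r actual = [] := by
  intro n
  induction n using Nat.strong_induction_on with
  | _ n ih =>
    intro A r actual hlen hr
    rw [nPr]
    rw [if_neg (by omega)]
    by_cases hA : A = []
    · simp [hA]
    · rw [if_neg hA]
      rw [PySem.List.foldl_append_eq_flatMap]
      rw [List.nil_append]
      rw [attach_flatMap (List.range A.length)
        (fun i => nPr (A.take i ++ A.drop (i + 1)) r (actual ++ [A.getD i 0]))]
      apply List.flatMap_eq_nil_iff.mpr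
      intro i hi
      have hilt : i < A.length := List.mem_range.mp hi
      have hl : (A.take i ++ A.drop (i + 1)).length < n := by
        simp [List.length_append, List.length_take, List.length_drop]; omega
      exact ih _ hl _ r _ rfl (by simp; omega)

-- A returns [] whenever r asks for more elements than the accumulator plus A can supply
theorem nPr_big : ∀ (n : Nat) (A : List Int) (r : Int) (actual : List Int),
    A.length = n → (actual.length : Int) + (A.length : Int) < r → nPr A r actual = [] := by
  intro n
  induction n using Nat.strong_induction_on with
  | _ n ih =>
    intro A r actual hlen hr
    rw [nPr]
    rw [if_neg (by omega)]
    by_cases hA : A = []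
    · simp [hA]
    · rw [if_neg hA]
      rw [PySem.List.foldl_append_eq_flatMap]
      rw [List.nil_append]
      rw [attach_flatMap (List.range A.length)
        (fun i => nPr (A.take i ++ A.drop (i + 1)) r (actual ++ [A.getD i 0]))]
      apply List.flatMap_eq_nil_iff.mpr
      intro i hi
      have hilt : i < A.length := List.mem_range.mp hi
      have hl : (A.take i ++ A.drop (i + 1)).length < n := by
        simp [List.length_append, List.length_take, List.length_drop]; omega
      apply ih _ hl _ r _ rfl
      simp [List.length_append, List.length_take, List.length_drop]
      omega

-- main correspondence: expanding one frontier element n times gives A's recursion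
theorem expandN_eq_nPr : ∀ (n : Nat) (rem pre : List Int) (r : Int),
    r = (pre.length : Int) + n →
    (expandN n [(pre, rem)]).map Prod.fst = nPr rem r pre := by
  intro n
  induction n with
  | zero =>
    intro rem pre r hr
    rw [nPr, if_pos (by omega)]
    rfl
  | succ n ih =>
    intro rem pre r hr
    rw [nPr, if_neg (by omega)]
    have hstep : expandN (n + 1) [(pre, rem)] = expandN n (pyStep (pre, rem)) := by
      simp [expandN]
    by_cases hrem : rem = []
    · subst hrem
      rw [if_pos rfl, hstep]
      simp [pyStep, expandN_nil]
    · rw [if_neg hrem, hstep]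
      rw [PySem.List.foldl_append_eq_flatMap]
      rw [List.nil_append]
      rw [attach_flatMap (List.range rem.length)
        (fun i => nPr (rem.take i ++ rem.drop (i + 1)) r (pre ++ [rem.getD i 0]))]
      rw [pyStep, expandN_flat, List.flatMap_map, List.map_flatMap]
      apply List.flatMap_congr  -- pointwise equality of the two index scans
      intro i _
      exact ih (rem.take i ++ rem.drop (i + 1)) (pre ++ [rem.getD i 0]) r
        (by simp at hr ⊢; omega)

-- ===== VERDICT (by name: the statement is the Claim_ definition above) =====
theorem nPr_spec : Claim_equal_nPr := by
  intro A r actual _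
  unfold Spec_nPr nPr_alt
  by_cases h : r - (actual.length : Int) < 0 ∨ r - (actual.length : Int) > (A.length : Int)
  · rw [if_pos h]
    rcases h with h | h
    · exact nPr_neg A.length A r actual rfl (by omega)
    · exact nPr_big A.length A r actual rfl (by omega)
  · rw [if_neg h]
    rw [foldl_const_expand, List.length_range]
    exact (expandN_eq_nPr (r - (actual.length : Int)).toNat A actual r (by omega)).symm
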